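-- pv_equiv track=rewrite | github.com/OpenProBono/openprobono | app/milvusdb.py | fuzzy_keyword_query
-- ===== SOURCE A (Python) =====
-- def fuzzy_keyword_query(keyword_query: str) -> str:
--     """Create a fuzzy* version of a keyword query.
--
--     *Replaces uppercase letters and the first letter of every word
--     with a wildcard character (_). Mainly for case-insensitivity.
--
--     Parameters
--     ----------
--     keyword_query : str
--         the original keyword query
--
--     Returns
--     -------
--     str
--         A fuzzy version of the keyword query
--
--     """
--     min_length_fuzzy = 6
--     keywords = keyword_query.split()
--     fuzzy_keywords = [
--         "".join([
--             c if not c.isupper() or len(kw) < min_length_fuzzy else "_"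
--             for c in kw
--         ])
--         for kw in keywords
--     ]
--     fuzzy_keywords = [
--         kw if len(kw) < min_length_fuzzy else "_" + kw[1:]
--         for kw in fuzzy_keywords
--     ]
--     fuzzy_keywords_str = " ".join(fuzzy_keywords)
--     fuzzy_keywords_str = fuzzy_keywords_str.replace("%", "\\\\%")
--     fuzzy_keywords_str = fuzzy_keywords_str.replace('"', '\\"')
--     return fuzzy_keywords_str.replace("'", "\\'")
-- ===== SOURCE B (Python) =====
-- def _esc(c):
--     """Escape one character the way the final replace-chain would."""
--     if c == "%":
--         return "\\\\%"
--     if c == '"':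
--         return '\\"'
--     if c == "'":
--         return "\\'"
--     return c
--
--
-- def _emit(word, parts):
--     """Append the fuzzified, already-escaped rendering of one word."""
--     if parts:
--         parts.append(" ")
--     if len(word) < 6:
--         for c in word:
--             parts.append(_esc(c))
--     else:
--         parts.append("_")
--         for c in word[1:]:
--             parts.append("_" if c.isupper() else _esc(c))
--
--
-- def fuzzy_keyword_query(keyword_query: str) -> str:
--     """Streaming state machine: one scan over the raw string buffers each word,
--     flushes it fuzzified with escaping fused in; no split/replace passes."""
--     parts = []
--     buf = []
--     for c in keyword_query:
--         if c.isspace():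
--             if buf:
--                 _emit(buf, parts)
--                 buf = []
--         else:
--             buf.append(c)
--     if buf:
--         _emit(buf, parts)
--     return "".join(parts)
-- ===== Notes on version B (the rewrite author's own statement) =====
-- stated objective: alternative
-- what changed: A stages six passes over the data (split, an uppercase-wildcard comprehension, a first-char-wildcard comprehension, join, then three global replace passes for escaping); B is a single streaming scan over the raw string that buffers each word and, on flush, emits its fuzzified characters with the SQL-escaping fused in per character, so no split/join/replace pass exists.
import Mathlib
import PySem

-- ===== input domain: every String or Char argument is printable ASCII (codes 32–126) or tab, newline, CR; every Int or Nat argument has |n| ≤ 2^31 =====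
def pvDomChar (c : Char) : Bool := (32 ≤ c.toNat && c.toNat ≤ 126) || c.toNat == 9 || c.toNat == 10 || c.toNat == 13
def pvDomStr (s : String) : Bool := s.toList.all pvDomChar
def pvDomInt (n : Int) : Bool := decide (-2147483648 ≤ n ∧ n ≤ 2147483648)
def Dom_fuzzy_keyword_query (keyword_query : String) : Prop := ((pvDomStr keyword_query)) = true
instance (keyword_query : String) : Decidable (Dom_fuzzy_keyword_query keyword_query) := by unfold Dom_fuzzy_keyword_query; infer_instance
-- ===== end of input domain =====

-- B replaces A's staged pipeline (split, two comprehension passes, join, three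
-- global replace passes) by one streaming scan over the raw string that buffers
-- each word and flushes it fuzzified with the escaping fused in (objective:
-- alternative single-pass state machine, same cost).

-- ===== PORT A =====
-- A's first comprehension: uppercase → '_' unless the word is short
def aFuzz1 (kw : String) : String :=
  PySem.Str.join "" (kw.toList.map (fun c =>
    if !PySem.Chars.isupper c || decide (PySem.Str.len kw < 6) then String.ofList [c] else "_"))

-- A's second comprehension: first char of a long word → '_'
def aFuzz2 (kw : String) : String :=
  if PySem.Str.len kw < 6 then kw else "_" ++ PySem.Str.slice kw (some 1) none

def fuzzy_keyword_query (keyword_query : String) : String :=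
  let keywords := PySem.Str.split₀ keyword_query
  let fuzzy_keywords := keywords.map aFuzz1
  let fuzzy_keywords := fuzzy_keywords.map aFuzz2
  let fuzzy_keywords_str := PySem.Str.join " " fuzzy_keywords
  let fuzzy_keywords_str := PySem.Str.replace fuzzy_keywords_str "%" "\\\\%"
  let fuzzy_keywords_str := PySem.Str.replace fuzzy_keywords_str "\"" "\\\""
  PySem.Str.replace fuzzy_keywords_str "'" "\\'"

-- ===== PORT B =====
-- Source B's _esc: escape one character the way the final replace-chain would
def bEsc (c : Char) : String :=
  if c = '%' then "\\\\%"
  else if c = '"' then "\\\""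
  else if c = '\'' then "\\'"
  else String.ofList [c]

-- Source B's _emit: append the fuzzified, escaped rendering of one buffered word
def bEmit (word : List Char) (parts : List String) : List String :=
  let parts := if parts.isEmpty then parts else parts ++ [" "]
  if word.length < 6 then
    word.foldl (fun ps c => ps ++ [bEsc c]) parts
  else
    (PySem.List.slice word (some 1) none).foldl
      (fun ps c => ps ++ [if PySem.Chars.isupper c then "_" else bEsc c]) (parts ++ ["_"])

-- the body of Source B's for-loop over the characters
def bStep (s : List String × List Char) (c : Char) : List String × List Char :=
  if PySem.Chars.isspace c then
    if s.2.isEmpty then s else (bEmit s.2 s.1, ([] : List Char))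
  else (s.1, s.2 ++ [c])

def fuzzy_keyword_query_alt (keyword_query : String) : String :=
  let st := keyword_query.toList.foldl bStep ([], [])
  let parts := if st.2.isEmpty then st.1 else bEmit st.2 st.1
  PySem.Str.join "" parts

-- ===== PRECONDITION & SPEC =====
def Spec_fuzzy_keyword_query (keyword_query : String) (out : String) : Prop := out = fuzzy_keyword_query_alt keyword_query
instance (keyword_query : String) (out : String) : Decidable (Spec_fuzzy_keyword_query keyword_query out) := by unfold Spec_fuzzy_keyword_query; infer_instance

-- ===== CLAIM (what is proved, stated in full; the proofs are below) =====
def Claim_equal_fuzzy_keyword_query : Prop := ∀ (keyword_query : String), Dom_fuzzy_keyword_query keyword_query → Spec_fuzzy_keyword_query keyword_query (fuzzy_keyword_query keyword_query)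

-- ===== LEMMAS AND PROOFS =====

-- escL c = what the three replaces, applied in A's order, do to the single character c
def escL (c : Char) : List Char :=
  if c = '%' then ['\\', '\\', '%']
  else if c = '"' then ['\\', '"']
  else if c = '\'' then ['\\', '\''] else [c]

-- B's per-word rendering, on the char-list level
def transB (w : List Char) : List Char :=
  if w.length < 6 then w.flatMap escL
  else '_' :: w.tail.flatMap (fun c => if PySem.Chars.isupper c then ['_'] else escL c)

-- the characters of a parts list once joined by ""
def charsOf (ps : List String) : List Char := (ps.map String.toList).flatten

-- the final flush of Source B (if buf: _emit(buf, parts))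
def bFinal (st : List String × List Char) : List String :=
  if st.2.isEmpty then st.1 else bEmit st.2 st.1

-- the words of l when buf is the word buffered so far (B's tokenisation)
def wordsFrom : List Char → List Char → List (List Char)
  | [], buf => if buf = [] then [] else [buf]
  | c :: rest, buf =>
    if PySem.Chars.isspace c then
      if buf = [] then wordsFrom rest [] else buf :: wordsFrom rest []
    else wordsFrom rest (buf ++ [c])

-- words joined by one space, resp. each word preceded by one space
def joinW (ws : List (List Char)) : List Char := PySem.Chars.join [' '] (ws.map transB)
def sepW (ws : List (List Char)) : List Char := ws.flatMap (fun w => ' ' :: transB w)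

lemma bEsc_toList (c : Char) : (bEsc c).toList = escL c := by
  unfold bEsc escL; split_ifs <;> simp

lemma joinW_cons (w : List Char) (ws : List (List Char)) :
    joinW (w :: ws) = transB w ++ sepW ws := by
  induction ws generalizing w with
  | nil => simp [joinW, sepW, PySem.Chars.join_singleton]
  | cons x t ih =>
    unfold joinW at ih ⊢
    rw [List.map_cons, List.map_cons, PySem.Chars.join_cons_cons, ← List.map_cons, ih]
    simp [sepW]

lemma join_nil_flatten (ls : List (List Char)) : PySem.Chars.join [] ls = ls.flatten := by
  induction ls with
  | nil => simp [PySem.Chars.join_nil]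
  | cons p t ih =>
    cases t with
    | nil => simp [PySem.Chars.join_singleton]
    | cons q r => rw [PySem.Chars.join_cons_cons, ih]; simp

-- single-character replace is a flatMap
lemma replace_go_single (p : Char) (new : List Char) :
    ∀ (fuel : Nat) (l acc : List Char), l.length ≤ fuel →
    PySem.Chars.replace.go [p] new fuel l acc
      = acc.reverse ++ l.flatMap (fun c => if c = p then new else [c]) := by
  intro fuel
  induction fuel with
  | zero =>
    intro l acc h
    have hl : l = [] := List.length_eq_zero_iff.mp (Nat.le_zero.mp h)
    subst hl
    simp [PySem.Chars.replace.go]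
  | succ n ih =>
    intro l acc h
    cases l with
    | nil => simp [PySem.Chars.replace.go]
    | cons c t =>
      show PySem.Chars.replace.go [p] new (n+1) (c :: t) acc = _
      rw [PySem.Chars.replace.go]
      by_cases hc : c = p
      · subst hc
        have hpre : [c].isPrefixOf (c :: t) = true := by simp [List.isPrefixOf]
        rw [if_pos hpre]
        rw [ih _ _ (by simpa using Nat.le_of_succ_le_succ (by simpa using h))]
        simp
      · have hpre : [p].isPrefixOf (c :: t) = false := by
          simp only [List.isPrefixOf, Bool.and_true, beq_eq_false_iff_ne]
          exact fun hh => absurd hh.symm hc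
        rw [if_neg (by simp [hpre])]
        rw [ih _ _ (by simpa using Nat.le_of_succ_le_succ (by simpa using h))]
        simp [hc]

lemma replace_single (s : List Char) (p : Char) (new : List Char) :
    PySem.Chars.replace s [p] new = s.flatMap (fun c => if c = p then new else [c]) := by
  unfold PySem.Chars.replace
  rw [if_neg (by simp)]
  simpa using replace_go_single p new s.length s [] le_rfl

-- the three replaces together act as escL, character by character
lemma chain_esc (l : List Char) :
    PySem.Chars.replace (PySem.Chars.replace (PySem.Chars.replace l
        ['%'] ['\\', '\\', '%']) ['"'] ['\\', '"']) ['\''] ['\\', '\'']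
      = l.flatMap escL := by
  rw [replace_single, replace_single, replace_single]
  induction l with
  | nil => simp
  | cons c t ih =>
    simp only [List.flatMap_cons, List.flatMap_append, ih]
    congr 1
    by_cases h1 : c = '%'
    · subst h1; decide
    by_cases h2 : c = '"'
    · subst h2; decide
    by_cases h3 : c = '\''
    · subst h3; decide
    simp [escL, h1, h2, h3]

-- escaping distributes over the space-join
lemma flatMap_esc_join (ls : List (List Char)) :
    (PySem.Chars.join [' '] ls).flatMap escL
      = PySem.Chars.join [' '] (ls.map (fun l => l.flatMap escL)) := by
  induction ls with
  | nil => simp [PySem.Chars.join_nil]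
  | cons p t ih =>
    cases t with
    | nil => simp [PySem.Chars.join_singleton]
    | cons q r =>
      rw [PySem.Chars.join_cons_cons, List.map_cons, List.map_cons,
        PySem.Chars.join_cons_cons, ← List.map_cons, ← ih]
      simp [escL]

lemma aFuzz1_toList (w : String) :
    (aFuzz1 w).toList = w.toList.map (fun c =>
      if !PySem.Chars.isupper c || decide (PySem.Str.len w < 6) then c else '_') := by
  unfold aFuzz1
  rw [PySem.Str.toList_join, List.map_map]
  have h : (String.toList ∘ fun c =>
      if !PySem.Chars.isupper c || decide (PySem.Str.len w < 6) then String.ofList [c] else "_")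
      = (fun c => [c]) ∘ (fun c =>
      if !PySem.Chars.isupper c || decide (PySem.Str.len w < 6) then c else '_') := by
    funext c; simp only [Function.comp_apply]; split <;> simp
  have hnil : ("" : String).toList = [] := rfl
  rw [h, hnil, ← List.map_map, PySem.Chars.join_nil_singletons]

-- the escaped A-rendering of one word is B's rendering
lemma word_chars (w : String) :
    (aFuzz2 (aFuzz1 w)).toList.flatMap escL = transB w.toList := by
  have hA := aFuzz1_toList w
  have hlen : (aFuzz1 w).toList.length = w.toList.length := by rw [hA]; simp
  by_cases h : PySem.Str.len w < 6
  · have hw : aFuzz1 w = w := by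
      apply String.ext
      rw [hA]
      have hc : ∀ c ∈ w.toList,
          (if (!PySem.Chars.isupper c || decide (PySem.Str.len w < 6)) = true then c else '_') = c := by
        intro c _; rw [if_pos]
        simp only [Bool.or_eq_true, decide_eq_true_eq]
        right; exact h
      rw [List.map_congr_left hc]
      simp
    rw [hw]
    unfold aFuzz2 transB
    rw [if_pos h, if_pos (by rw [PySem.Str.len_eq] at h; omega)]
  · have h6 : 6 ≤ w.toList.length := by rw [PySem.Str.len_eq] at h; omega
    have hlenA : ¬ PySem.Str.len (aFuzz1 w) < 6 := by
      rw [PySem.Str.len_eq, hlen]; omega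
    unfold aFuzz2 transB
    rw [if_neg hlenA, if_neg (by omega)]
    have hd : decide (PySem.Str.len w < 6) = false := by
      simp only [decide_eq_false_iff_not]; exact h
    have hchars : ("_" ++ PySem.Str.slice (aFuzz1 w) (some 1) none).toList
        = '_' :: (aFuzz1 w).toList.tail := by
      rw [String.toList_append, PySem.Str.toList_slice, PySem.Chars.slice_eq_listSlice,
        PySem.List.slice_from_one]
      rfl
    rw [hchars, hA]
    simp only [hd, Bool.or_false, List.flatMap_cons]
    have hu : escL '_' = ['_'] := by decide
    rw [hu, ← List.map_tail, List.flatMap_map]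
    simp only [List.cons_append, List.nil_append]
    refine congrArg (List.cons '_') ?_
    apply List.flatMap_congr
    intro c _
    by_cases hc : PySem.Chars.isupper c = true
    · simp [hc, hu]
    · simp [hc]

-- characters produced by one _emit call
lemma bEmit_chars (w : List Char) (parts : List String) :
    charsOf (bEmit w parts)
      = charsOf parts ++ (if parts.isEmpty then ([] : List Char) else [' ']) ++ transB w := by
  have hm1 : w.map (String.toList ∘ bEsc) = w.map escL :=
    List.map_congr_left (fun c _ => bEsc_toList c)
  have hm2 : ∀ v : List Char,
      v.map (String.toList ∘ fun c => if PySem.Chars.isupper c then "_" else bEsc c)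
        = v.map (fun c => if PySem.Chars.isupper c then ['_'] else escL c) := by
    intro v
    apply List.map_congr_left
    intro c _
    simp only [Function.comp_apply]
    by_cases hc : PySem.Chars.isupper c = true
    · rw [if_pos hc, if_pos hc]; rfl
    · rw [if_neg hc, if_neg hc]; exact bEsc_toList c
  unfold bEmit transB
  rw [PySem.List.slice_from_one]
  by_cases hlen : w.length < 6
  · rw [if_pos hlen, if_pos hlen, PySem.List.foldl_append_singleton_eq_map]
    cases hp : parts.isEmpty
    · simp only [Bool.false_eq_true]
      simp [charsOf, List.flatMap_def]
      rw [hm1]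
    · simp only []
      simp [charsOf, List.flatMap_def]
      rw [hm1]
  · rw [if_neg hlen, if_neg hlen, PySem.List.foldl_append_singleton_eq_map]
    cases hp : parts.isEmpty
    · simp only [Bool.false_eq_true]
      simp [charsOf, List.flatMap_def]
      rw [hm2]
    · simp only []
      simp [charsOf, List.flatMap_def]
      rw [hm2]

lemma bEmit_ne_nil (w : List Char) (parts : List String) (hw : w ≠ []) :
    (bEmit w parts).isEmpty = false := by
  unfold bEmit
  rw [PySem.List.slice_from_one]
  by_cases hlen : w.length < 6
  · rw [if_pos hlen, PySem.List.foldl_append_singleton_eq_map]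
    simp [List.isEmpty_iff, hw]
  · rw [if_neg hlen, PySem.List.foldl_append_singleton_eq_map]
    simp [List.isEmpty_iff]

-- split₀'s worker computes wordsFrom
lemma split₀_go_spec (l : List Char) :
    ∀ (cur : List Char) (acc : List (List Char)),
    PySem.Chars.split₀.go l cur acc = acc.reverse ++ wordsFrom l cur.reverse := by
  induction l with
  | nil =>
    intro cur acc
    rw [PySem.Chars.split₀.go, wordsFrom]
    cases hc : cur.isEmpty
    · rw [if_neg (by simp [hc]), if_neg (by simp [List.isEmpty_iff] at hc; simp [hc])]
      simp
    · rw [if_pos (by simp [hc]), if_pos (by simp [List.isEmpty_iff] at hc; simp [hc])]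
      simp
  | cons c rest ih =>
    intro cur acc
    rw [PySem.Chars.split₀.go, wordsFrom]
    cases hs : PySem.Chars.isspace c
    · rw [if_neg (by simp [hs]), if_neg (by simp [hs]), ih]
      simp
    · cases hc : cur.isEmpty
      · have hcne : cur ≠ [] := by simpa [List.isEmpty_iff] using hc
        have hrne : cur.reverse ≠ [] := by simpa using hcne
        rw [if_pos (by simp [hs]), if_neg (by simp [hc]), if_pos (by simp [hs]), if_neg hrne, ih]
        simp
      · have hce : cur = [] := by simpa [List.isEmpty_iff] using hc
        rw [if_pos (by simp [hs]), if_pos (by simp [hc]), if_pos (by simp [hs]),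
          if_pos (by simp [hce]), ih]
        simp [hce]

lemma split₀_eq_wordsFrom (l : List Char) : PySem.Chars.split₀ l = wordsFrom l [] := by
  have := split₀_go_spec l [] []
  simpa [PySem.Chars.split₀] using this

-- the streaming loop renders exactly the words wordsFrom finds
lemma bFold_spec (l : List Char) :
    ∀ (parts : List String) (buf : List Char),
    charsOf (bFinal (l.foldl bStep (parts, buf)))
      = charsOf parts
        ++ (if parts.isEmpty then joinW (wordsFrom l buf) else sepW (wordsFrom l buf)) := by
  induction l with
  | nil =>
    intro parts buf
    rw [List.foldl_nil, wordsFrom]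
    unfold bFinal
    cases hb : buf.isEmpty
    · have hbne : buf ≠ [] := by simpa [List.isEmpty_iff] using hb
      rw [if_neg (by simp [hb]), if_neg hbne, bEmit_chars]
      cases hp : parts.isEmpty <;> simp [hp, joinW_cons, sepW, joinW]
    · have hbe : buf = [] := by simpa [List.isEmpty_iff] using hb
      rw [if_pos (by simp [hb]), if_pos hbe]
      cases hp : parts.isEmpty <;> simp [hp, joinW, sepW, PySem.Chars.join_nil]
  | cons c rest ih =>
    intro parts buf
    rw [List.foldl_cons]
    show charsOf (bFinal (List.foldl bStep (bStep (parts, buf) c) rest)) = _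
    cases hs : PySem.Chars.isspace c
    · have hstep : bStep (parts, buf) c = (parts, buf ++ [c]) := by
        unfold bStep; rw [if_neg (by simp [hs])]
      have hwf : wordsFrom (c :: rest) buf = wordsFrom rest (buf ++ [c]) := by
        rw [wordsFrom, if_neg (by simp [hs])]
      rw [hstep, hwf, ih]
    · cases hb : buf.isEmpty
      · have hbne : buf ≠ [] := by simpa [List.isEmpty_iff] using hb
        have hstep : bStep (parts, buf) c = (bEmit buf parts, []) := by
          unfold bStep; rw [if_pos (by simp [hs]), if_neg (by simp [hb])]
        have hwf : wordsFrom (c :: rest) buf = buf :: wordsFrom rest [] := by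
          rw [wordsFrom, if_pos (by simp [hs]), if_neg hbne]
        rw [hstep, hwf, ih, bEmit_chars, bEmit_ne_nil buf parts hbne]
        cases hp : parts.isEmpty <;> simp [hp, joinW_cons, sepW, List.append_assoc]
      · have hbe : buf = [] := by simpa [List.isEmpty_iff] using hb
        have hstep : bStep (parts, buf) c = (parts, buf) := by
          unfold bStep; rw [if_pos (by simp [hs]), if_pos (by simp [hb])]
        have hwf : wordsFrom (c :: rest) buf = wordsFrom rest [] := by
          rw [wordsFrom, if_pos (by simp [hs]), if_pos hbe]
        rw [hstep, hwf, hbe, ih]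

-- ===== VERDICT (by name: the statement is the Claim_ definition above) =====
set_option maxHeartbeats 1000000 in
theorem fuzzy_keyword_query_spec : Claim_equal_fuzzy_keyword_query := by
  intro q _
  show fuzzy_keyword_query q = fuzzy_keyword_query_alt q
  apply String.ext
  -- A side: the replace chain over the space-join becomes joinW over split₀'s words
  show (PySem.Str.replace (PySem.Str.replace (PySem.Str.replace
      (PySem.Str.join " " (((PySem.Str.split₀ q).map aFuzz1).map aFuzz2))
      "%" "\\\\%") "\"" "\\\"") "'" "\\'").toList = _
  rw [PySem.Str.toList_replace, PySem.Str.toList_replace, PySem.Str.toList_replace]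
  have hp : ("%" : String).toList = ['%'] := rfl
  have hpn : ("\\\\%" : String).toList = ['\\', '\\', '%'] := rfl
  have hq : ("\"" : String).toList = ['"'] := rfl
  have hqn : ("\\\"" : String).toList = ['\\', '"'] := rfl
  have hr : ("'" : String).toList = ['\''] := rfl
  have hrn : ("\\'" : String).toList = ['\\', '\''] := rfl
  have hsep : (" " : String).toList = [' '] := rfl
  rw [hp, hpn, hq, hqn, hr, hrn, chain_esc, PySem.Str.toList_join, hsep, flatMap_esc_join]
  have hmaps : ((((PySem.Str.split₀ q).map aFuzz1).map aFuzz2).map String.toList).map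
      (fun l => l.flatMap escL) = ((PySem.Chars.split₀ q.toList).map transB) := by
    rw [← PySem.Str.split₀_map_toList]
    simp only [List.map_map]
    apply List.map_congr_left
    intro w _
    simp only [Function.comp_apply]
    exact word_chars w
  rw [hmaps]
  -- B side: the streaming loop
  show _ = (PySem.Str.join "" (bFinal (q.toList.foldl bStep ([], [])))).toList
  have hnil : ("" : String).toList = [] := rfl
  rw [PySem.Str.toList_join, hnil, join_nil_flatten]
  show joinW (PySem.Chars.split₀ q.toList) = charsOf (bFinal (q.toList.foldl bStep ([], [])))
  rw [bFold_spec q.toList [] [], split₀_eq_wordsFrom]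
  simp [charsOf]
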